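-- pv_equiv track=rewrite | github.com/JuYeong98/PS_Algorithm_with_Python | Programmers_Level_1/harshard_number.py | solution
-- ===== SOURCE A (Python) =====
-- def solution(x):
--     n=x
--     sum=0
--     while n>0:
--         sum+=n%10
--         n=n//10
--
--     if x%sum==0:
--         return True
--     else:
--         return False
-- ===== SOURCE B (Python) =====
-- def solution(x):
--     s = sum(int(c) for c in str(x))
--     return x % s == 0
-- ===== Notes on version B (the rewrite author's own statement) =====
-- stated objective: idiomatic
-- what changed: The digit sum is computed by summing the characters of the decimal string of x instead of A's arithmetic remainder/quotient extraction loop; Pre_ excludes non-positive x, where both programs raise (A: ZeroDivisionError, B: ValueError or ZeroDivisionError).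
import Mathlib
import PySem

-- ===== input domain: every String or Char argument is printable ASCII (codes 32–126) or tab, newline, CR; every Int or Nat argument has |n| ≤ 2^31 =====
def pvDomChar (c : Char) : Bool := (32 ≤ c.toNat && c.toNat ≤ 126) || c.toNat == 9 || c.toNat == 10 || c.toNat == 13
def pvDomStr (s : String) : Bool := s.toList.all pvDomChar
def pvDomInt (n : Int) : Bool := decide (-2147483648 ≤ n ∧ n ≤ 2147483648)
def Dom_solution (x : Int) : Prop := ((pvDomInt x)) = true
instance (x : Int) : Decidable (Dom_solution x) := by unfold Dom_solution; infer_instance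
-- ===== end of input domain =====

-- B computes the digit sum from the decimal string of x instead of A's %10 // 10 loop (idiomatic rewrite).


-- ===== PORT A =====
-- while n > 0: sum += n % 10; n = n // 10
def loopA (n sum : Int) : Int :=
  if _h : 0 < n then loopA (PySem.Int.floordiv n 10) (sum + PySem.Int.mod n 10) else sum
termination_by n.toNat
decreasing_by
  have := PySem.Int.floordiv_lt_iff_lt_mul (a := n) (b := 10) (q := n) (by omega)
  omega

def solution (x : Int) : Bool :=
  let sum := loopA x 0
  -- x % sum == 0 (Python raises ZeroDivisionError when sum = 0; Pre_solution excludes that)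
  if PySem.Int.mod x sum = 0 then true else false

-- ===== PORT B =====
-- int(c) on one character of str(x); for x inside Pre_ every character is a digit, so the getD 0 default is never taken
def charIntB (c : Char) : Int := (PySem.Int.ofChars? [c]).getD 0

def solution_alt (x : Int) : Bool :=
  let s : Int := ((PySem.Int.toStr x).toList.map charIntB).sum
  -- x % s == 0 (Python raises when s = 0; outside Pre_ B raises before A's mod anyway)
  PySem.Int.mod x s = 0

-- ===== PRECONDITION & SPEC =====
-- Pre_ excludes exactly the non-positive inputs, where both programs raise (A: ZeroDivisionError; B: ValueError on the '-' character or ZeroDivisionError at zero).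
def Pre_solution (x : Int) : Prop := 0 < x
instance (x : Int) : Decidable (Pre_solution x) := by unfold Pre_solution; infer_instance
def pvWitness_solution : Int := (18)
def Spec_solution (x : Int) (out : Bool) : Prop := out = solution_alt x
instance (x : Int) (out : Bool) : Decidable (Spec_solution x out) := by unfold Spec_solution; infer_instance

-- ===== CLAIM (what is proved, stated in full; the proofs are below) =====
def Claim_equal_solution : Prop := ∀ (x : Int), Dom_solution x → Pre_solution x → Spec_solution x (solution x)

-- ===== LEMMAS AND PROOFS =====

-- total digit sum of a natural number
def sumD (m : Nat) : Nat :=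
  if m = 0 then 0 else m % 10 + sumD (m / 10)
decreasing_by exact Nat.div_lt_self (by omega) (by omega)

theorem charIntB_digitChar (d : Nat) (hd : d < 10) :
    charIntB (Nat.digitChar d) = (d : Int) := by
  interval_cases d <;> decide

theorem sum_toDigitsCore (fuel : Nat) : ∀ (n : Nat) (ds : List Char), n < fuel →
    ((Nat.toDigitsCore 10 fuel n ds).map charIntB).sum
      = (sumD n : Int) + (ds.map charIntB).sum := by
  induction fuel with
  | zero => intro n ds h; omega
  | succ fuel ih =>
    intro n ds h
    by_cases h10 : n / 10 = 0
    · have hstep : Nat.toDigitsCore 10 (fuel + 1) n ds = Nat.digitChar (n % 10) :: ds := by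
        rw [Nat.toDigitsCore]; simp [h10]
      rw [hstep, List.map_cons, List.sum_cons,
        charIntB_digitChar (n % 10) (Nat.mod_lt _ (by omega))]
      rcases Nat.eq_zero_or_pos n with h0 | h0
      · subst h0; simp [sumD]
      · conv_rhs => rw [sumD, if_neg (by omega : ¬ n = 0), sumD, if_pos h10]
        push_cast; ring
    · have hstep : Nat.toDigitsCore 10 (fuel + 1) n ds
          = Nat.toDigitsCore 10 fuel (n / 10) (Nat.digitChar (n % 10) :: ds) := by
        rw [Nat.toDigitsCore]; simp [h10]
      have hlt : n / 10 < fuel := by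
        have := Nat.div_lt_self (n := n) (by omega) (by omega : 1 < 10)
        omega
      rw [hstep, ih (n / 10) _ hlt, List.map_cons, List.sum_cons,
        charIntB_digitChar (n % 10) (Nat.mod_lt _ (by omega))]
      conv_rhs => rw [sumD, if_neg (by omega : ¬ n = 0)]
      push_cast; ring

theorem sum_toChars (m : Nat) :
    (((PySem.Int.toStr (m : Int)).toList.map charIntB).sum) = (sumD m : Int) := by
  rw [PySem.Int.toList_toStr]
  have : PySem.Int.toChars (m : Int) = Nat.toDigits 10 m := by
    simp [PySem.Int.toChars]
  rw [this, Nat.toDigits]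
  simpa using sum_toDigitsCore (m + 1) m [] (by omega)

theorem loopA_eq (m : Nat) : ∀ (acc : Int), loopA (m : Int) acc = acc + (sumD m : Int) := by
  induction m using Nat.strong_induction_on with
  | _ m ih =>
    intro acc
    rw [loopA]
    by_cases h0 : 0 < (m : Int)
    · rw [dif_pos h0]
      rw [show (10 : Int) = ((10 : Nat) : Int) from rfl,
        PySem.Int.floordiv_natCast m 10, PySem.Int.mod_natCast m 10]
      rw [ih (m / 10) (Nat.div_lt_self (by omega) (by omega))]
      conv_rhs => rw [sumD, if_neg (by omega : ¬ m = 0)]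
      push_cast; ring
    · rw [dif_neg h0]
      have : m = 0 := by omega
      subst this; rw [sumD]; simp

-- ===== VERDICT (by name: the statement is the Claim_ definition above) =====
theorem solution_spec : Claim_equal_solution := by
  intro x _ hpre
  have hx : 0 < x := hpre
  obtain ⟨m, rfl⟩ : ∃ m : Nat, x = (m : Int) := ⟨x.toNat, by omega⟩
  unfold Spec_solution solution solution_alt
  simp only [sum_toChars, loopA_eq m 0]
  simp
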